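-- pv_equiv track=rewrite | github.com/jeffomidvaran/TheBlockouts | code/final_project.py | spawn_multiple_enemies
-- ===== SOURCE A (Python) =====
-- from builtins import range
--
-- def spawn_multiple_enemies(ememy_list):
--   result_string = ""
--   for e in ememy_list:
--     for _ in range(e[1]):
--       if(e[0] == "Creeper"):
--         result_string +=  '''<DrawEntity x="10" y="227" z="10" type="{}" yaw="0" xVel="{}" yVel="{}" zVel="{}"/>'''.format(e[0],1,1,1)
--       elif(e[0] == "Villager" or e[0] == "Sheep"):
--         result_string +=  '''<DrawEntity x="4" y="227" z="4" type="{}" yaw="0" />'''.format(e[0])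
--       else:
--         result_string +=  '''<DrawEntity x="10" y="227" z="10" type="{}" yaw="0" />'''.format(e[0])
--   return result_string
-- ===== SOURCE B (Python) =====
-- def spawn_multiple_enemies(ememy_list):
--   pieces = []
--   for e in ememy_list:
--     if e[0] == "Creeper":
--       template = '<DrawEntity x="10" y="227" z="10" type="{}" yaw="0" xVel="1" yVel="1" zVel="1"/>'.format(e[0])
--     elif e[0] == "Villager" or e[0] == "Sheep":
--       template = '<DrawEntity x="4" y="227" z="4" type="{}" yaw="0" />'.format(e[0])
--     else:
--       template = '<DrawEntity x="10" y="227" z="10" type="{}" yaw="0" />'.format(e[0])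
--     pieces.append(template * e[1])
--   return "".join(pieces)
-- ===== Notes on version B (the rewrite author's own statement) =====
-- stated objective: simpler
-- what changed: Replaces the nested per-count range loop with a single pass that formats each enemy's template once and appends it count-times via string repetition, joining the pieces.
import Mathlib
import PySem

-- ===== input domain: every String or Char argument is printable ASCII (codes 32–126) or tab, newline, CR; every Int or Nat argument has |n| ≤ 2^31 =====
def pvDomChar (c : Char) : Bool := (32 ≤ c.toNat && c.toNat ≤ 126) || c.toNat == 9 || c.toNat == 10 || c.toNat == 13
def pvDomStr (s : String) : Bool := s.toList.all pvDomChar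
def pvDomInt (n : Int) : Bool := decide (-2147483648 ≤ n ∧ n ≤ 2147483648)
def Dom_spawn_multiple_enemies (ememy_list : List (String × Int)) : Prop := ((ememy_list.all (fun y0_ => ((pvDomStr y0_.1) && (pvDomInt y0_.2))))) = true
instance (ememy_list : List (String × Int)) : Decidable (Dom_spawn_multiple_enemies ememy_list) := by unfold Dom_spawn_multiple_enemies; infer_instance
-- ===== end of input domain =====

-- B replaces A's inner per-count range loop by formatting each enemy's template once and
-- repeating it count-times (string repetition), joining the pieces: simpler single pass.


-- ===== PORT A =====
-- literal transliteration: outer loop over the list, inner loop over range(e[1]),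
-- appending the formatted chunk chosen by the branch chain each iteration
def spawn_multiple_enemies (ememy_list : List (String × Int)) : String :=
  ememy_list.foldl (fun result_string e =>
    (PySem.List.pyRange 0 e.2 1).foldl (fun rs _ =>
      if e.1 = "Creeper" then
        rs ++ ("<DrawEntity x=\"10\" y=\"227\" z=\"10\" type=\"" ++ e.1 ++ "\" yaw=\"0\" xVel=\"1\" yVel=\"1\" zVel=\"1\"/>")
      else if e.1 = "Villager" ∨ e.1 = "Sheep" then
        rs ++ ("<DrawEntity x=\"4\" y=\"227\" z=\"4\" type=\"" ++ e.1 ++ "\" yaw=\"0\" />")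
      else
        rs ++ ("<DrawEntity x=\"10\" y=\"227\" z=\"10\" type=\"" ++ e.1 ++ "\" yaw=\"0\" />")) result_string) ""

-- ===== PORT B =====
-- Python's  template * count  : empty for count ≤ 0
def pvStrMul (s : String) (n : Int) : String := String.join (List.replicate n.toNat s)

def pvTemplate (t : String) : String :=
  if t = "Creeper" then
    "<DrawEntity x=\"10\" y=\"227\" z=\"10\" type=\"" ++ t ++ "\" yaw=\"0\" xVel=\"1\" yVel=\"1\" zVel=\"1\"/>"
  else if t = "Villager" ∨ t = "Sheep" then
    "<DrawEntity x=\"4\" y=\"227\" z=\"4\" type=\"" ++ t ++ "\" yaw=\"0\" />"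
  else
    "<DrawEntity x=\"10\" y=\"227\" z=\"10\" type=\"" ++ t ++ "\" yaw=\"0\" />"

def spawn_multiple_enemies_alt (ememy_list : List (String × Int)) : String :=
  String.join (ememy_list.map (fun e => pvStrMul (pvTemplate e.1) e.2))

-- ===== PRECONDITION & SPEC =====
def Spec_spawn_multiple_enemies (ememy_list : List (String × Int)) (out : String) : Prop := out = spawn_multiple_enemies_alt ememy_list
instance (ememy_list : List (String × Int)) (out : String) : Decidable (Spec_spawn_multiple_enemies ememy_list out) := by unfold Spec_spawn_multiple_enemies; infer_instance

-- ===== CLAIM (what is proved, stated in full; the proofs are below) =====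
def Claim_equal_spawn_multiple_enemies : Prop := ∀ (ememy_list : List (String × Int)), Dom_spawn_multiple_enemies ememy_list → Spec_spawn_multiple_enemies ememy_list (spawn_multiple_enemies ememy_list)

-- ===== LEMMAS AND PROOFS =====

-- pull the accumulator out of a string-concatenation fold
theorem foldl_str_out (xs : List String) : ∀ r : String,
    xs.foldl (fun a s => a ++ s) r = r ++ xs.foldl (fun a s => a ++ s) "" := by
  induction xs with
  | nil => intro r; simp
  | cons x xs ih =>
      intro r
      simp only [List.foldl_cons]
      rw [ih (r ++ x), ih ("" ++ x)]
      simp [String.append_assoc]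

theorem join_cons (s : String) (l : List String) :
    String.join (s :: l) = s ++ String.join l := by
  simp only [String.join, List.foldl_cons]
  exact foldl_str_out _ ("" ++ s) |>.trans (by simp)

-- a fold that appends the same chunk once per element only depends on the length
theorem foldl_append_const (c : String) : ∀ (xs : List Int) (r : String),
    xs.foldl (fun rs _ => rs ++ c) r = r ++ String.join (List.replicate xs.length c) := by
  intro xs
  induction xs with
  | nil => intro r; simp [String.join]
  | cons x xs ih =>
      intro r
      simp only [List.foldl_cons, ih, List.length_cons, List.replicate_succ, join_cons]
      rw [String.append_assoc]

-- inner loop of A = string repetition used by B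
theorem inner_eq (e : String × Int) (r : String) :
    (PySem.List.pyRange 0 e.2 1).foldl (fun rs _ =>
      if e.1 = "Creeper" then
        rs ++ ("<DrawEntity x=\"10\" y=\"227\" z=\"10\" type=\"" ++ e.1 ++ "\" yaw=\"0\" xVel=\"1\" yVel=\"1\" zVel=\"1\"/>")
      else if e.1 = "Villager" ∨ e.1 = "Sheep" then
        rs ++ ("<DrawEntity x=\"4\" y=\"227\" z=\"4\" type=\"" ++ e.1 ++ "\" yaw=\"0\" />")
      else
        rs ++ ("<DrawEntity x=\"10\" y=\"227\" z=\"10\" type=\"" ++ e.1 ++ "\" yaw=\"0\" />")) r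
    = r ++ pvStrMul (pvTemplate e.1) e.2 := by
  have hlen : (PySem.List.pyRange 0 e.2 1).length = e.2.toNat := by
    rw [PySem.List.length_pyRange_one]; omega
  by_cases h1 : e.1 = "Creeper"
  · simp only [h1, pvStrMul, pvTemplate, ← hlen]
    exact foldl_append_const _ _ r
  · by_cases h2 : e.1 = "Villager" ∨ e.1 = "Sheep"
    · simp only [if_neg h1, if_pos h2, pvStrMul, pvTemplate, ← hlen]
      exact foldl_append_const _ _ r
    · simp only [if_neg h1, if_neg h2, pvStrMul, pvTemplate, ← hlen]
      exact foldl_append_const _ _ r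

theorem outer_eq : ∀ (l : List (String × Int)) (r : String),
    l.foldl (fun result_string e =>
      (PySem.List.pyRange 0 e.2 1).foldl (fun rs _ =>
        if e.1 = "Creeper" then
          rs ++ ("<DrawEntity x=\"10\" y=\"227\" z=\"10\" type=\"" ++ e.1 ++ "\" yaw=\"0\" xVel=\"1\" yVel=\"1\" zVel=\"1\"/>")
        else if e.1 = "Villager" ∨ e.1 = "Sheep" then
          rs ++ ("<DrawEntity x=\"4\" y=\"227\" z=\"4\" type=\"" ++ e.1 ++ "\" yaw=\"0\" />")
        else
          rs ++ ("<DrawEntity x=\"10\" y=\"227\" z=\"10\" type=\"" ++ e.1 ++ "\" yaw=\"0\" />")) result_string) r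
    = r ++ spawn_multiple_enemies_alt l := by
  intro l r
  simp only [inner_eq]
  have key : ∀ (l : List (String × Int)) (r : String),
      l.foldl (fun a e => a ++ pvStrMul (pvTemplate e.1) e.2) r
        = r ++ String.join (l.map (fun e => pvStrMul (pvTemplate e.1) e.2)) := by
    intro l
    induction l with
    | nil => intro r; simp [String.join]
    | cons e l ih =>
        intro r
        simp only [List.foldl_cons, ih, List.map_cons, join_cons]
        rw [String.append_assoc]
  exact key l r

-- ===== VERDICT (by name: the statement is the Claim_ definition above) =====
theorem spawn_multiple_enemies_spec : Claim_equal_spawn_multiple_enemies := by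
  intro l _
  show spawn_multiple_enemies l = spawn_multiple_enemies_alt l
  have := outer_eq l ""
  simpa [spawn_multiple_enemies] using this
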